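-- pv_equiv track=rewrite | github.com/Hyuga-Yamaguchi/competitve-programing | algorithm/bit_search/bit_search.py | bit_plus
-- ===== SOURCE A (Python) =====
-- def bit_plus(list):
--     sum = 0
--     # 0(0b000)から7(0b111)までを探索
--     # range内 0b001を len(list) = 3個分ずらす→0b1000 = 8(⑽進法)
--     for bit in range(1 << len(list)):
--         # 0(0b000)から7(0b111)を001, 010, 100をANDで比較
--         # 要素の個数0~3個までが全て一致する
--         for i in range(len(list)):
--             mask = 1 << i
--             if bit & mask:
--                 sum += list[i]
--     return sum
-- ===== SOURCE B (Python) =====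
-- def bit_plus(list):
--     # Closed form: each element appears in exactly half of the 2**n masks.
--     if not list:
--         return 0
--     return sum(list) * (1 << (len(list) - 1))
-- ===== Notes on version B (the rewrite author's own statement) =====
-- stated objective: faster
-- what changed: Replaced the n*2^n enumeration of all bit masks by the closed form sum(list) * 2^(len-1) (each element is counted in exactly half of the masks).
import Mathlib
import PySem

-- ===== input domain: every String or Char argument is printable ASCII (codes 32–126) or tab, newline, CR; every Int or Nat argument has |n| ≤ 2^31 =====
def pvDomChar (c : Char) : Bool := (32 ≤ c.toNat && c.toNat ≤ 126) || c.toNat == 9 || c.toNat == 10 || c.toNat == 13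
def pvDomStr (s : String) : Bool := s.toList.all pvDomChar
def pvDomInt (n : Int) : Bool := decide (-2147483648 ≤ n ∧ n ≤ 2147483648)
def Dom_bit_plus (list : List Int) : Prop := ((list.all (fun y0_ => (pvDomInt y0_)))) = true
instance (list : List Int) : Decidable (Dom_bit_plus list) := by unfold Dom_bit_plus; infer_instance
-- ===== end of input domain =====

-- B replaces A's O(n·2^n) enumeration of all masks by the closed form sum(list) * 2^(n-1) (faster).

-- ===== PORT A =====
-- for bit in range(1 << len(list)): for i in range(len(list)): if bit & (1 << i): sum += list[i]
def bit_plus (list : List Int) : Int :=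
  (PySem.List.pyRange 0 ((1 : Int) <<< list.length) 1).foldl (fun sum bit =>
    (PySem.List.pyRange 0 (list.length : Int) 1).foldl (fun sum i =>
      let mask : Int := (1 : Int) <<< i.toNat
      if PySem.Int.band bit mask ≠ 0 then sum + PySem.List.pyGetD list i 0 else sum) sum) 0

-- ===== PORT B =====
def bit_plus_alt (list : List Int) : Int :=
  if list = [] then 0 else list.sum * ((1 : Int) <<< (list.length - 1))

-- ===== PRECONDITION & SPEC =====
def Spec_bit_plus (list : List Int) (out : Int) : Prop := out = bit_plus_alt list
instance (list : List Int) (out : Int) : Decidable (Spec_bit_plus list out) := by unfold Spec_bit_plus; infer_instance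

-- ===== CLAIM (what is proved, stated in full; the proofs are below) =====
def Claim_equal_bit_plus : Prop := ∀ (list : List Int), Dom_bit_plus list → Spec_bit_plus list (bit_plus list)

-- ===== LEMMAS AND PROOFS =====

-- structural form of A's inner loop: contribution of list xs under mask k
def pvBitSum : List Int → Nat → Int
  | [], _ => 0
  | x :: xs, k => (if k % 2 = 1 then x else 0) + pvBitSum xs (k / 2)

-- A's inner loop, named so the outer induction can talk about it (defeq to the port's inner foldl)
def pvInnerLoop (xs : List Int) (bit s : Int) : Int :=
  (PySem.List.pyRange 0 (xs.length : Int) 1).foldl (fun sum i =>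
    let mask : Int := (1 : Int) <<< i.toNat
    if PySem.Int.band bit mask ≠ 0 then sum + PySem.List.pyGetD xs i 0 else sum) s

-- 1 <<< m on Int is the natural power of two
theorem pvShift (m : Nat) : ((1 : Int) <<< m) = ((2 ^ m : Nat) : Int) := by
  first
  | exact Int.one_shiftLeft m
  | (rw [Int.shiftLeft_eq]; push_cast; ring)

-- a guarded accumulating foldl is init + sum of the guarded terms
theorem pvFoldlIf {α : Type} (l : List α) (p : α → Prop) [DecidablePred p] (g : α → Int)
    (a : Int) :
    l.foldl (fun s x => if p x then s + g x else s) a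
      = a + (l.map (fun x => if p x then g x else 0)).sum := by
  induction l generalizing a with
  | nil => simp
  | cons y ys ih =>
      simp only [List.foldl_cons, List.map_cons, List.sum_cons]
      by_cases h : p y
      · simp [h, ih]; ring
      · simp [h, ih]

-- the two bit tests agree one level down
theorem pvBitStep (k i : Nat) : (k &&& 2 ^ (i + 1) = 0) ↔ (k / 2 &&& 2 ^ i = 0) := by
  rw [Nat.and_two_pow, Nat.and_two_pow, Nat.testBit_add_one]
  cases h : (k / 2).testBit i
  · simp [h]
  · simp [h]

-- A's inner loop over indices computes pvBitSum
theorem pvInner (xs : List Int) (k : Nat) :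
    ((List.range xs.length).map (fun (i : Nat) =>
        if ((k &&& 2 ^ i : Nat) : Int) ≠ 0 then xs.getD i 0 else 0)).sum
      = pvBitSum xs k := by
  induction xs generalizing k with
  | nil => simp [pvBitSum]
  | cons x xs ih =>
      rw [List.length_cons, List.range_succ_eq_map]
      simp only [List.map_cons, List.sum_cons, List.map_map]
      have hhead : (if ((k &&& 2 ^ 0 : Nat) : Int) ≠ 0 then (x :: xs).getD 0 0 else 0)
          = (if k % 2 = 1 then x else 0) := by
        have h2 : ((k &&& 2 ^ 0 : Nat) : Int) ≠ 0 ↔ k % 2 = 1 := by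
          rw [pow_zero, Nat.and_one_is_mod]; omega
        simp only [h2, List.getD_cons_zero]
      have htail : ∀ i ∈ List.range xs.length,
          ((fun (i : Nat) => if ((k &&& 2 ^ i : Nat) : Int) ≠ 0
              then (x :: xs).getD i 0 else 0) ∘ Nat.succ) i
            = (fun (i : Nat) => if (((k / 2) &&& 2 ^ i : Nat) : Int) ≠ 0
              then xs.getD i 0 else 0) i := by
        intro i _
        simp only [Function.comp_apply, Nat.succ_eq_add_one, List.getD_cons_succ]
        by_cases hc : (k &&& 2 ^ (i + 1) : Nat) = 0
        · simp [hc, (pvBitStep k i).mp hc]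
        · have hc2 : ¬ (k / 2 &&& 2 ^ i = 0) := fun h => hc ((pvBitStep k i).mpr h)
          simp [hc, hc2]
      rw [hhead, List.map_congr_left htail, ih (k / 2)]
      rfl

-- doubling: a sum over range (2N) regrouped in pairs
theorem pvDouble (g : Nat → Int) (N : Nat) :
    ((List.range (2 * N)).map g).sum
      = ((List.range N).map (fun q => g (2 * q) + g (2 * q + 1))).sum := by
  induction N with
  | zero => simp
  | succ n ih =>
      have h : 2 * (n + 1) = (2 * n + 1) + 1 := by omega
      rw [h, List.range_succ, List.range_succ, List.range_succ]
      simp only [List.map_append, List.sum_append, List.map_cons, List.map_nil,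
        List.sum_cons, List.sum_nil]
      rw [ih]
      ring

-- pulling a constant out of a mapped sum
theorem pvSumConstAdd {α : Type} (l : List α) (x : Int) (g : α → Int) :
    (l.map (fun q => x + 2 * g q)).sum = (l.length : Int) * x + 2 * (l.map g).sum := by
  induction l with
  | nil => simp
  | cons h t ih =>
      simp only [List.map_cons, List.sum_cons, List.length_cons, ih]
      push_cast
      ring

-- summing pvBitSum over all masks gives B's closed form
theorem pvMain (xs : List Int) :
    ((List.range (2 ^ xs.length)).map (pvBitSum xs)).sum = bit_plus_alt xs := by
  induction xs with
  | nil => simp [pvBitSum, bit_plus_alt]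
  | cons x xs ih =>
      have hlen : (2 : Nat) ^ (x :: xs).length = 2 * 2 ^ xs.length := by
        rw [List.length_cons]; ring
      rw [hlen, pvDouble]
      have hterm : ∀ q ∈ List.range (2 ^ xs.length),
          pvBitSum (x :: xs) (2 * q) + pvBitSum (x :: xs) (2 * q + 1)
            = x + 2 * pvBitSum xs q := by
        intro q _
        simp only [pvBitSum]
        have e1 : (2 * q) % 2 = 0 := by omega
        have e2 : (2 * q) / 2 = q := by omega
        have e3 : (2 * q + 1) % 2 = 1 := by omega
        have e4 : (2 * q + 1) / 2 = q := by omega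
        rw [e1, e2, e3, e4]
        simp
        ring
      rw [List.map_congr_left hterm, pvSumConstAdd, List.length_range, ih]
      cases xs with
      | nil => simp [bit_plus_alt]
      | cons y ys =>
          simp only [bit_plus_alt, if_neg (by simp : ¬(x :: y :: ys = [])),
            if_neg (by simp : ¬(y :: ys = [])), pvShift, List.length_cons, List.sum_cons]
          have h1 : ys.length + 1 + 1 - 1 = ys.length + 1 := rfl
          have h2 : ys.length + 1 - 1 = ys.length := rfl
          rw [h1, h2, pow_succ]
          push_cast
          ring

-- the inner fold of the port, expressed through pvBitSum
theorem pvInnerLoop_eq (xs : List Int) (k : Nat) (s : Int) :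
    pvInnerLoop xs (k : Int) s = s + pvBitSum xs k := by
  unfold pvInnerLoop
  rw [show ((xs.length : Int)) = (((xs.length : Nat) : Int)) from rfl,
    PySem.List.pyRange_zero_nat, List.foldl_map]
  simp only [Int.toNat_natCast, PySem.List.pyGetD_natCast, Int.one_shiftLeft,
    PySem.Int.band_natCast]
  rw [pvFoldlIf (List.range xs.length)
    (fun (j : Nat) => ((k &&& 2 ^ j : Nat) : Int) ≠ 0)
    (fun (j : Nat) => xs.getD j 0) s]
  rw [pvInner xs k]

-- A's whole computation is the sum of pvBitSum over all masks
theorem pvPortA (xs : List Int) :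
    bit_plus xs = ((List.range (2 ^ xs.length)).map (pvBitSum xs)).sum := by
  have heq : bit_plus xs
      = (PySem.List.pyRange 0 ((1 : Int) <<< xs.length) 1).foldl
          (fun s bit => pvInnerLoop xs bit s) 0 := rfl
  rw [heq]
  have hbound : ((1 : Int) <<< xs.length) = ((2 ^ xs.length : Nat) : Int) := pvShift _
  rw [hbound, PySem.List.pyRange_zero_nat, List.foldl_map]
  have houter : ∀ (l : List Nat) (a : Int),
      l.foldl (fun s b => pvInnerLoop xs ((b : Nat) : Int) s) a
        = a + (l.map (pvBitSum xs)).sum := by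
    intro l
    induction l with
    | nil => simp
    | cons b t iht =>
        intro a
        simp only [List.foldl_cons, List.map_cons, List.sum_cons]
        rw [pvInnerLoop_eq, iht]
        ring
  simpa using houter (List.range (2 ^ xs.length)) 0

-- ===== VERDICT (by name: the statement is the Claim_ definition above) =====
theorem bit_plus_spec : Claim_equal_bit_plus := by
  intro list _
  unfold Spec_bit_plus
  rw [pvPortA, pvMain]
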